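-- pv_equiv track=rewrite | github.com/Nounoursdestavernes/AdventOfCode2023 | src/day21/Part1/part1.py | part1
-- ===== SOURCE A (Python) =====
-- from functools import cache
--
-- STEPS = 64
--
-- def part1(lines: list[str]) -> int:
--     """ Returns the number of garden plots of land that the elf could reach """
--     start = 0
--     garden_plots = {}
--     for i, line in enumerate(lines):
--         for j, char in enumerate(line):
--             if char == '.':
--                 garden_plots[j + i * 1j] = False
--             elif char == 'S':
--                 start = j + i * 1j
--                 garden_plots[j + i * 1j] = False
--
--     directions = [1, 1j, -1, -1j]
--
--     @cache
--     def neigbours(position: complex) -> list[complex]: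
--         res = []
--         for direction in directions:
--             new_position = position + direction
--             if new_position in garden_plots:
--                 res.append(new_position)
--         return res
--
--     positions = set()
--     positions.add(start)
--     for _ in range(STEPS):
--         next_positions = set()
--         while positions:
--
--             position = positions.pop()
--
--             for neighbour in neigbours(position):
--                 next_positions.add(neighbour)
--
--         positions = next_positions
--
--
--     return len(positions)
-- ===== SOURCE B (Python) =====
-- STEPS = 64
--
-- def part1(lines: list[str]) -> int:
--     """ Returns the number of garden plots of land that the elf could reach """
--     start = 0j
--     garden = set()
--     for i, line in enumerate(lines):
--         for j, char in enumerate(line):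
--             if char == '.' or char == 'S':
--                 garden.add(complex(j, i))
--                 if char == 'S':
--                     start = complex(j, i)
--
--     def neighbours(p):
--         return [p + d for d in (1, 1j, -1, -1j) if p + d in garden]
--
--     # one BFS from start, recording the first (shortest) step count for each plot
--     dist = {start: 0}
--     frontier = [start]
--     for d in range(1, STEPS + 1):
--         new = []
--         for p in frontier:
--             for q in neighbours(p):
--                 if q not in dist:
--                     dist[q] = d
--                     new.append(q)
--         frontier = new
--
--     # reachable in exactly STEPS steps = even shortest distance (<= STEPS by construction);
--     # the start itself only counts if it is a plot that can oscillate with a neighbour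
--     count = sum(1 for d in dist.values() if d % 2 == 0 and d > 0)
--     if start in garden and neighbours(start):
--         count += 1
--     return count
-- ===== Notes on version B (the rewrite author's own statement) =====
-- stated objective: alternative
-- what changed: Replaces 64 rounds of whole-set frontier re-expansion with a single BFS that records each plot's shortest distance once, then counts plots at even distance (guarding the start, which only counts if it is a garden plot with a neighbour to oscillate with).
import Mathlib
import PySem

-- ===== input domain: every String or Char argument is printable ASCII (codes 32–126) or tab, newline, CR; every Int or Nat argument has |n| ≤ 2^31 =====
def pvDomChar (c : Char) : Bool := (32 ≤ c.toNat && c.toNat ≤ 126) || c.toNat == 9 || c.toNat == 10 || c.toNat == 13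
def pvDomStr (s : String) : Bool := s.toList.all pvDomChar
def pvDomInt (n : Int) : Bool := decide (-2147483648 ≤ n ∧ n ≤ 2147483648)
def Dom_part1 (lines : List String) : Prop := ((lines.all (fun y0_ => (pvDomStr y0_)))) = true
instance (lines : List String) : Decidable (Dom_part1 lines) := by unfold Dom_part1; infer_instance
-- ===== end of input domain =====

-- B replaces A's 64 rounds of whole-set frontier re-expansion by a single BFS that labels each
-- plot with its shortest distance once, then counts the plots at even distance (objective: alternative).

-- ===== PORT A =====
-- positions are complex numbers j + i*1j, modelled as pairs (j, i) = (re, im)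
def pvDirs : List (Int × Int) := [(1, 0), (0, 1), (-1, 0), (0, -1)]

def pvScanA (lines : List String) : (Int × Int) × PySem.Dict (Int × Int) Bool :=
  (PySem.List.enumerate lines 0).foldl (fun st il =>
    (PySem.List.enumerate il.2.toList 0).foldl (fun st2 jc =>
      if jc.2 = '.' then (st2.1, st2.2.insert (jc.1, il.1) false)
      else if jc.2 = 'S' then ((jc.1, il.1), st2.2.insert (jc.1, il.1) false)
      else st2) st) ((0, 0), PySem.Dict.empty)

def pvNbrsA (gp : PySem.Dict (Int × Int) Bool) (p : Int × Int) : List (Int × Int) :=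
  pvDirs.foldl (fun res d =>
    if gp.contains (p.1 + d.1, p.2 + d.2) then res ++ [(p.1 + d.1, p.2 + d.2)] else res) []

-- one round of the loop body: drain `positions`, collecting every neighbour into the next set
def pvStepA (gp : PySem.Dict (Int × Int) Bool) (positions : PySem.Set (Int × Int)) :
    PySem.Set (Int × Int) :=
  positions.foldl (fun nxt p => (pvNbrsA gp p).foldl (fun s q => s.add q) nxt) PySem.Set.empty

def part1 (lines : List String) : Int :=
  let sg := pvScanA lines
  let positions : PySem.Set (Int × Int) := PySem.Set.empty.add sg.1
  let final := (PySem.List.pyRange 0 64 1).foldl (fun positions _ => pvStepA sg.2 positions) positions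
  (PySem.Set.len final : Int)

-- ===== PORT B =====
def pvScanB (lines : List String) : (Int × Int) × PySem.Set (Int × Int) :=
  (PySem.List.enumerate lines 0).foldl (fun st il =>
    (PySem.List.enumerate il.2.toList 0).foldl (fun st2 jc =>
      if jc.2 = '.' ∨ jc.2 = 'S' then
        ((if jc.2 = 'S' then (jc.1, il.1) else st2.1), PySem.Set.add st2.2 (jc.1, il.1))
      else st2) st) ((0, 0), PySem.Set.empty)

def pvNbrsB (g : PySem.Set (Int × Int)) (p : Int × Int) : List (Int × Int) :=
  pvDirs.filterMap (fun d =>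
    if PySem.Set.contains g (p.1 + d.1, p.2 + d.2) then some (p.1 + d.1, p.2 + d.2) else none)

-- one BFS level: expand the frontier, recording distance d for every newly seen plot
def pvLevel (g : PySem.Set (Int × Int)) (st : PySem.Dict (Int × Int) Int × List (Int × Int))
    (d : Int) : PySem.Dict (Int × Int) Int × List (Int × Int) :=
  st.2.foldl (fun acc p =>
    (pvNbrsB g p).foldl (fun acc2 q =>
      if acc2.1.contains q then acc2 else (acc2.1.insert q d, acc2.2 ++ [q])) acc) (st.1, [])

def part1_alt (lines : List String) : Int :=
  let sg := pvScanB lines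
  let final := (PySem.List.pyRange 1 65 1).foldl (pvLevel sg.2)
    (PySem.Dict.empty.insert sg.1 (0 : Int), [sg.1])
  let count := final.1.values.foldl
    (fun c d => if PySem.Int.mod d 2 = 0 ∧ 0 < d then c + 1 else c) (0 : Int)
  if PySem.Set.contains sg.2 sg.1 = true ∧ pvNbrsB sg.2 sg.1 ≠ [] then count + 1 else count

-- ===== PRECONDITION & SPEC =====
def Spec_part1 (lines : List String) (out : Int) : Prop := out = part1_alt lines
instance (lines : List String) (out : Int) : Decidable (Spec_part1 lines out) := by
  unfold Spec_part1; infer_instance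

-- ===== CLAIM (what is proved, stated in full; the proofs are below) =====
def Claim_equal_part1 : Prop := ∀ (lines : List String), Dom_part1 lines → Spec_part1 lines (part1 lines)

-- ===== LEMMAS AND PROOFS =====

-- relation between the two scans: same start, same garden membership
def PvSRel (sA : (Int × Int) × PySem.Dict (Int × Int) Bool)
    (sB : (Int × Int) × PySem.Set (Int × Int)) : Prop :=
  sA.1 = sB.1 ∧ ∀ p, sA.2.contains p = PySem.Set.contains sB.2 p

lemma pvScan_step (i j : Int) (c : Char) (sA : (Int × Int) × PySem.Dict (Int × Int) Bool)
    (sB : (Int × Int) × PySem.Set (Int × Int)) (h : PvSRel sA sB) :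
    PvSRel (if c = '.' then (sA.1, sA.2.insert (j, i) false)
            else if c = 'S' then ((j, i), sA.2.insert (j, i) false) else sA)
           (if c = '.' ∨ c = 'S' then
              ((if c = 'S' then (j, i) else sB.1), PySem.Set.add sB.2 (j, i))
            else sB) := by
  obtain ⟨h1, h2⟩ := h
  have hc : ∀ p, (sA.2.insert (j, i) false).contains p
      = PySem.Set.contains (PySem.Set.add sB.2 (j, i)) p := by
    intro p
    rw [PySem.Dict.contains_insert, h2 p, PySem.Set.contains_eq_decide,
      PySem.Set.contains_eq_decide]
    simp only [PySem.Set.mem_add]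
    by_cases hp : p = (j, i) <;> simp [hp]
  by_cases hd : c = '.'
  · subst hd
    rw [if_pos rfl, if_pos (Or.inl rfl), if_neg (by decide)]
    exact ⟨h1, hc⟩
  · by_cases hs : c = 'S'
    · subst hs
      rw [if_neg (by decide), if_pos rfl, if_pos (Or.inr rfl), if_pos rfl]
      exact ⟨rfl, hc⟩
    · rw [if_neg hd, if_neg hs, if_neg (by tauto)]
      exact ⟨h1, h2⟩

lemma pvScan_inner (i : Int) (cs : List Char) : ∀ (j : Int)
    (sA : (Int × Int) × PySem.Dict (Int × Int) Bool)
    (sB : (Int × Int) × PySem.Set (Int × Int)), PvSRel sA sB →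
    PvSRel ((PySem.List.enumerate cs j).foldl (fun st2 jc =>
        if jc.2 = '.' then (st2.1, st2.2.insert (jc.1, i) false)
        else if jc.2 = 'S' then ((jc.1, i), st2.2.insert (jc.1, i) false)
        else st2) sA)
      ((PySem.List.enumerate cs j).foldl (fun st2 jc =>
        if jc.2 = '.' ∨ jc.2 = 'S' then
          ((if jc.2 = 'S' then (jc.1, i) else st2.1), PySem.Set.add st2.2 (jc.1, i))
        else st2) sB) := by
  induction cs with
  | nil => intro j sA sB h; simpa [PySem.List.enumerate_nil] using h
  | cons c cs ih =>
    intro j sA sB h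
    rw [PySem.List.enumerate_cons]
    simp only [List.foldl_cons]
    exact ih (j + 1) _ _ (pvScan_step i j c sA sB h)

lemma pvScan_outer (lines : List String) : ∀ (i : Int)
    (sA : (Int × Int) × PySem.Dict (Int × Int) Bool)
    (sB : (Int × Int) × PySem.Set (Int × Int)), PvSRel sA sB →
    PvSRel ((PySem.List.enumerate lines i).foldl (fun st il =>
        (PySem.List.enumerate il.2.toList 0).foldl (fun st2 jc =>
          if jc.2 = '.' then (st2.1, st2.2.insert (jc.1, il.1) false)
          else if jc.2 = 'S' then ((jc.1, il.1), st2.2.insert (jc.1, il.1) false)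
          else st2) st) sA)
      ((PySem.List.enumerate lines i).foldl (fun st il =>
        (PySem.List.enumerate il.2.toList 0).foldl (fun st2 jc =>
          if jc.2 = '.' ∨ jc.2 = 'S' then
            ((if jc.2 = 'S' then (jc.1, il.1) else st2.1), PySem.Set.add st2.2 (jc.1, il.1))
          else st2) st) sB) := by
  induction lines with
  | nil => intro i sA sB h; simpa [PySem.List.enumerate_nil] using h
  | cons l ls ih =>
    intro i sA sB h
    rw [PySem.List.enumerate_cons]
    simp only [List.foldl_cons]
    exact ih (i + 1) _ _ (pvScan_inner i l.toList 0 sA sB h)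

lemma pvScan_rel (lines : List String) : PvSRel (pvScanA lines) (pvScanB lines) := by
  have base : PvSRel ((0, 0), PySem.Dict.empty) ((0, 0), PySem.Set.empty) := by
    refine ⟨rfl, fun p => ?_⟩
    rw [PySem.Set.contains_eq_decide]
    simp [PySem.Dict.contains_empty, PySem.Set.empty_eq]
  exact pvScan_outer lines 0 _ _ base

lemma pvNbrs_eq (gp : PySem.Dict (Int × Int) Bool) (g : PySem.Set (Int × Int))
    (h : ∀ p, gp.contains p = PySem.Set.contains g p) :
    pvNbrsA gp = pvNbrsB g := by
  funext p
  simp only [pvNbrsA, pvNbrsB, pvDirs, List.foldl_cons, List.foldl_nil,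
    List.filterMap_cons, List.filterMap_nil, h]
  split_ifs <;> simp

-- characterisation of B's neighbour list
lemma mem_pvNbrsB (g : PySem.Set (Int × Int)) (p q : Int × Int) :
    q ∈ pvNbrsB g p ↔ PySem.Set.contains g q = true ∧
      (q = (p.1 + 1, p.2 + 0) ∨ q = (p.1 + 0, p.2 + 1) ∨
       q = (p.1 + -1, p.2 + 0) ∨ q = (p.1 + 0, p.2 + -1)) := by
  simp only [pvNbrsB, pvDirs, List.filterMap_cons, List.filterMap_nil]
  split_ifs <;> simp_all <;> aesop

lemma pvNbrsB_contains (g : PySem.Set (Int × Int)) (p q : Int × Int) (h : q ∈ pvNbrsB g p) :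
    PySem.Set.contains g q = true := ((mem_pvNbrsB g p q).1 h).1

lemma pvNbrsB_parity (g : PySem.Set (Int × Int)) (p q : Int × Int) (h : q ∈ pvNbrsB g p) :
    q.1 + q.2 - (p.1 + p.2) = 1 ∨ q.1 + q.2 - (p.1 + p.2) = -1 := by
  rcases ((mem_pvNbrsB g p q).1 h).2 with h' | h' | h' | h' <;> subst h' <;> simp <;> omega

lemma pvNbrsB_symm (g : PySem.Set (Int × Int)) (p q : Int × Int) (h : q ∈ pvNbrsB g p)
    (hp : PySem.Set.contains g p = true) : p ∈ pvNbrsB g q := by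
  rw [mem_pvNbrsB]
  refine ⟨hp, ?_⟩
  rcases ((mem_pvNbrsB g p q).1 h).2 with h' | h' | h' | h' <;> subst h' <;> simp <;> omega

-- A's iteration, abstracted over the neighbour function
def pvExpand (N : (Int × Int) → List (Int × Int)) (S : PySem.Set (Int × Int)) :
    PySem.Set (Int × Int) :=
  S.foldl (fun nxt p => (N p).foldl (fun s q => s.add q) nxt) PySem.Set.empty

def pvSA (N : (Int × Int) → List (Int × Int)) (start : Int × Int) : Nat → PySem.Set (Int × Int)
  | 0 => PySem.Set.empty.add start
  | k + 1 => pvExpand N (pvSA N start k)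

lemma mem_foldl_expand (N : (Int × Int) → List (Int × Int)) (S : List (Int × Int)) :
    ∀ (init : PySem.Set (Int × Int)) (x : Int × Int),
    (x ∈ S.foldl (fun nxt p => (N p).foldl (fun s q => s.add q) nxt) init ↔
      x ∈ init ∨ ∃ p ∈ S, x ∈ N p) := by
  induction S with
  | nil => intro init x; simp
  | cons p S ih =>
    intro init x
    simp only [List.foldl_cons, ih, PySem.Set.mem_foldl_add (f := fun q => q)]
    constructor
    · rintro (⟨h | ⟨b, hb, rfl⟩⟩ | ⟨r, hr, hx⟩)
      · exact Or.inl h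
      · exact Or.inr ⟨p, by simp, hb⟩
      · exact Or.inr ⟨r, by simp [hr], hx⟩
    · rintro (h | ⟨r, hr, hx⟩)
      · exact Or.inl (Or.inl h)
      · rcases List.mem_cons.1 hr with rfl | hr
        · exact Or.inl (Or.inr ⟨x, hx, rfl⟩)
        · exact Or.inr ⟨r, hr, hx⟩

lemma mem_pvExpand (N : (Int × Int) → List (Int × Int)) (S : PySem.Set (Int × Int))
    (x : Int × Int) : x ∈ pvExpand N S ↔ ∃ p ∈ S, x ∈ N p := by
  unfold pvExpand
  rw [mem_foldl_expand]
  simp [PySem.Set.empty_eq]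

lemma nodup_foldl_add (l : List (Int × Int)) :
    ∀ (s : PySem.Set (Int × Int)), s.Nodup →
      (l.foldl (fun s q => s.add q) s).Nodup := by
  induction l with
  | nil => intro s hs; simpa using hs
  | cons q l ih => intro s hs; exact ih _ (PySem.Set.nodup_add s q hs)

lemma nodup_pvExpand (N : (Int × Int) → List (Int × Int)) (S : PySem.Set (Int × Int)) :
    (pvExpand N S).Nodup := by
  unfold pvExpand
  have : ∀ (l : List (Int × Int)) (s : PySem.Set (Int × Int)), s.Nodup →
      (l.foldl (fun nxt p => (N p).foldl (fun s q => s.add q) nxt) s).Nodup := by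
    intro l
    induction l with
    | nil => intro s hs; simpa using hs
    | cons p l ih => intro s hs; exact ih _ (nodup_foldl_add (N p) s hs)
  exact this S _ (by simp [PySem.Set.empty_eq])

lemma nodup_pvSA (N : (Int × Int) → List (Int × Int)) (start : Int × Int) (k : Nat) :
    (pvSA N start k).Nodup := by
  cases k with
  | zero =>
    exact PySem.Set.nodup_add _ _ (by simp [PySem.Set.empty_eq])
  | succ k => exact nodup_pvExpand N _

lemma mem_pvSA_zero (N : (Int × Int) → List (Int × Int)) (start x : Int × Int) :
    x ∈ pvSA N start 0 ↔ x = start := by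
  simp [pvSA, PySem.Set.mem_add, PySem.Set.empty_eq]


lemma pvSA_eq_iterate (N : (Int × Int) → List (Int × Int)) (start : Int × Int) (n : Nat) :
    pvSA N start n = (pvExpand N)^[n] (PySem.Set.empty.add start) := by
  induction n with
  | zero => rfl
  | succ n ih => rw [Function.iterate_succ_apply', ← ih]; rfl

-- bridge: port A in terms of pvSA
lemma part1_eq (lines : List String) :
    part1 lines = ((pvSA (pvNbrsB (pvScanB lines).2) (pvScanB lines).1 64).length : Int) := by
  obtain ⟨h1, h2⟩ := pvScan_rel lines
  have hN : pvNbrsA (pvScanA lines).2 = pvNbrsB (pvScanB lines).2 := pvNbrs_eq _ _ h2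
  have hstep : pvStepA (pvScanA lines).2 = pvExpand (pvNbrsB (pvScanB lines).2) := by
    funext S; unfold pvStepA pvExpand; rw [hN]
  have key : ∀ (n : Nat) (init : PySem.Set (Int × Int)),
      (PySem.List.pyRange 0 (n : Int) 1).foldl
          (fun positions _ => pvStepA (pvScanA lines).2 positions) init
        = (pvExpand (pvNbrsB (pvScanB lines).2))^[n] init := by
    intro n
    induction n with
    | zero =>
      intro init
      simp [PySem.List.pyRange_one_eq_nil (by norm_num : (0:Int) ≤ 0)]
    | succ n ih =>
      intro init
      have hcast : ((n + 1 : Nat) : Int) = (n : Int) + 1 := by push_cast; ring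
      rw [hcast, PySem.List.pyRange_one_succ_right (by positivity), List.foldl_append]
      simp only [List.foldl_cons, List.foldl_nil, ih]
      rw [Function.iterate_succ_apply', hstep]
  simp only [part1]
  rw [PySem.Set.len_eq]
  have h64 : ((64 : Int)) = ((64 : Nat) : Int) := by norm_num
  rw [h64, key 64, h1, ← pvSA_eq_iterate]

-- ===== B side: the BFS state =====
def pvBState (g : PySem.Set (Int × Int)) (start : Int × Int) :
    Nat → PySem.Dict (Int × Int) Int × List (Int × Int)
  | 0 => (PySem.Dict.empty.insert start 0, [start])
  | k + 1 => pvLevel g (pvBState g start k) ((k : Int) + 1)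

lemma pvBState_eq_foldl (g : PySem.Set (Int × Int)) (start : Int × Int) (n : Nat) :
    (PySem.List.pyRange 1 (1 + (n : Int)) 1).foldl (pvLevel g)
      (PySem.Dict.empty.insert start 0, [start]) = pvBState g start n := by
  induction n with
  | zero =>
    simp [PySem.List.pyRange_one_eq_nil (by norm_num : (1:Int) + 0 ≤ 1)]
    rfl
  | succ n ih =>
    have hcast : (1 : Int) + ((n + 1 : Nat) : Int) = (1 + (n : Int)) + 1 := by push_cast; ring
    rw [hcast, PySem.List.pyRange_one_succ_right (by omega), List.foldl_append]
    simp only [List.foldl_cons, List.foldl_nil, ih]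
    show pvLevel g (pvBState g start n) (1 + (n : Int)) = pvBState g start (n + 1)
    rw [pvBState]
    congr 1
    ring

-- the fresh-key collecting fold of one BFS level
def pvStepC (d : Int) (acc : PySem.Dict (Int × Int) Int × List (Int × Int)) (q : Int × Int) :
    PySem.Dict (Int × Int) Int × List (Int × Int) :=
  if acc.1.contains q then acc else (acc.1.insert q d, acc.2 ++ [q])

lemma pvLevel_eq_collect (g : PySem.Set (Int × Int))
    (st : PySem.Dict (Int × Int) Int × List (Int × Int)) (d : Int) :
    pvLevel g st d = (st.2.flatMap (pvNbrsB g)).foldl (pvStepC d) (st.1, []) := by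
  unfold pvLevel pvStepC
  rw [List.foldl_flatMap]

lemma pvCollect_get? (d : Int) (Q : List (Int × Int)) :
    ∀ (δ : PySem.Dict (Int × Int) Int) (out : List (Int × Int)) (p : Int × Int),
      (Q.foldl (pvStepC d) (δ, out)).1.get? p
        = if p ∈ Q ∧ δ.get? p = none then some d else δ.get? p := by
  induction Q with
  | nil => intro δ out p; simp
  | cons q Q ih =>
    intro δ out p
    simp only [List.foldl_cons]
    by_cases hc : δ.contains q
    · rw [show pvStepC d (δ, out) q = (δ, out) from by simp [pvStepC, hc]]
      rw [ih δ out p]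
      have hq : δ.get? q ≠ none := by
        rw [Ne, PySem.Dict.get?_eq_none_iff_contains]; simp [hc]
      by_cases hp : p = q
      · subst hp; simp [hq]
      · simp [List.mem_cons, hp]
    · rw [show pvStepC d (δ, out) q = (δ.insert q d, out ++ [q]) from by simp [pvStepC, hc]]
      rw [ih _ _ p]
      rw [PySem.Dict.get?_insert]
      by_cases hp : p = q
      · subst hp
        have hq : δ.get? p = none := by
          rw [PySem.Dict.get?_eq_none_iff_contains]; simpa using hc
        simp [hq]
      · simp only [List.mem_cons, hp, false_or, if_neg hp]
        simp

lemma pvCollect_mem_out (d : Int) (Q : List (Int × Int)) :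
    ∀ (δ : PySem.Dict (Int × Int) Int) (out : List (Int × Int)) (x : Int × Int),
      (x ∈ (Q.foldl (pvStepC d) (δ, out)).2 ↔ x ∈ out ∨ (x ∈ Q ∧ δ.get? x = none)) := by
  induction Q with
  | nil => intro δ out x; simp
  | cons q Q ih =>
    intro δ out x
    simp only [List.foldl_cons]
    by_cases hc : δ.contains q
    · rw [show pvStepC d (δ, out) q = (δ, out) from by simp [pvStepC, hc]]
      rw [ih δ out x]
      have hq : δ.get? q ≠ none := by
        rw [Ne, PySem.Dict.get?_eq_none_iff_contains]; simp [hc]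
      constructor
      · rintro (h | ⟨hxQ, hx⟩)
        · exact Or.inl h
        · exact Or.inr ⟨List.mem_cons_of_mem _ hxQ, hx⟩
      · rintro (h | ⟨hxQ, hx⟩)
        · exact Or.inl h
        · rcases List.mem_cons.1 hxQ with rfl | hxQ
          · exact absurd hx hq
          · exact Or.inr ⟨hxQ, hx⟩
    · rw [show pvStepC d (δ, out) q = (δ.insert q d, out ++ [q]) from by simp [pvStepC, hc]]
      rw [ih _ _ x]
      have hq : δ.get? q = none := by
        rw [PySem.Dict.get?_eq_none_iff_contains]; simpa using hc
      rw [PySem.Dict.get?_insert]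
      by_cases hx : x = q
      · subst hx; simp [hq]
      · simp [List.mem_append, List.mem_cons, hx]

lemma pvCollect_nodup_keys (d : Int) (Q : List (Int × Int)) :
    ∀ (δ : PySem.Dict (Int × Int) Int) (out : List (Int × Int)), δ.keys.Nodup →
      (Q.foldl (pvStepC d) (δ, out)).1.keys.Nodup := by
  induction Q with
  | nil => intro δ out h; simpa using h
  | cons q Q ih =>
    intro δ out h
    simp only [List.foldl_cons]
    by_cases hc : δ.contains q
    · rw [show pvStepC d (δ, out) q = (δ, out) from by simp [pvStepC, hc]]
      exact ih δ out h
    · rw [show pvStepC d (δ, out) q = (δ.insert q d, out ++ [q]) from by simp [pvStepC, hc]]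
      exact ih _ _ (PySem.Dict.nodup_keys_insert δ q d h)

-- the BFS invariant
structure PvInv (g : PySem.Set (Int × Int)) (start : Int × Int) (k : Nat)
    (st : PySem.Dict (Int × Int) Int × List (Int × Int)) : Prop where
  nodup : st.1.keys.Nodup
  start0 : st.1.get? start = some 0
  bound : ∀ p d, st.1.get? p = some d → 0 ≤ d ∧ d ≤ (k : Int)
  zero : ∀ p, st.1.get? p = some 0 → p = start
  fr : ∀ p, p ∈ st.2 ↔ st.1.get? p = some ((k : Int))
  pred : ∀ p d, st.1.get? p = some d → 1 ≤ d →
    PySem.Set.contains g p = true ∧ ∃ q, st.1.get? q = some (d - 1) ∧ p ∈ pvNbrsB g q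
  expl : ∀ p d, st.1.get? p = some d → d < (k : Int) → ∀ q ∈ pvNbrsB g p,
    ∃ dq, st.1.get? q = some dq ∧ dq ≤ d + 1
  par : ∀ p d, st.1.get? p = some d → (p.1 + p.2 + d) % 2 = (start.1 + start.2) % 2

lemma pvInv_zero (g : PySem.Set (Int × Int)) (start : Int × Int) :
    PvInv g start 0 (PySem.Dict.empty.insert start (0 : Int), [start]) := by
  have hget : ∀ p : Int × Int, (PySem.Dict.empty.insert start (0 : Int)).get? p
      = if p = start then some 0 else none := by
    intro p
    rw [PySem.Dict.get?_insert]
    simp [PySem.Dict.get?_empty]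
  refine ⟨?_, ?_, ?_, ?_, ?_, ?_, ?_, ?_⟩
  · exact PySem.Dict.nodup_keys_insert _ _ _ (PySem.Dict.nodup_keys_empty)
  · exact PySem.Dict.get?_insert_self _ _ _
  · intro p d h
    dsimp only at h
    rw [hget] at h
    split_ifs at h with hp <;> simp_all
  · intro p h
    dsimp only at h
    rw [hget] at h
    split_ifs at h with hp <;> simp_all
  · intro p
    show p ∈ [start] ↔ (PySem.Dict.empty.insert start (0 : Int)).get? p = some 0
    rw [hget]
    by_cases hp : p = start <;> simp [hp]
  · intro p d h hd
    dsimp only at h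
    rw [hget] at h
    split_ifs at h with hp <;> simp_all <;> omega
  · intro p d h hd
    dsimp only at h
    rw [hget] at h
    split_ifs at h with hp <;> simp_all <;> omega
  · intro p d h
    dsimp only at h
    rw [hget] at h
    split_ifs at h with hp
    have hd0 : (0 : Int) = d := by simpa using h
    rw [hp, ← hd0]
    omega

lemma pvInv_step (g : PySem.Set (Int × Int)) (start : Int × Int) (k : Nat)
    (inv : PvInv g start k (pvBState g start k)) :
    PvInv g start (k + 1) (pvBState g start (k + 1)) := by
  set st := pvBState g start k with hst
  set Q := st.2.flatMap (pvNbrsB g) with hQ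
  have hnew : pvBState g start (k + 1) = Q.foldl (pvStepC ((k : Int) + 1)) (st.1, []) := by
    rw [pvBState, pvLevel_eq_collect]
  have hget : ∀ p, (pvBState g start (k + 1)).1.get? p
      = if p ∈ Q ∧ st.1.get? p = none then some ((k : Int) + 1) else st.1.get? p := by
    intro p; rw [hnew, pvCollect_get?]
  have hout : ∀ x, x ∈ (pvBState g start (k + 1)).2 ↔ (x ∈ Q ∧ st.1.get? x = none) := by
    intro x; rw [hnew, pvCollect_mem_out]; simp
  have hQmem : ∀ x, x ∈ Q ↔ ∃ p ∈ st.2, x ∈ pvNbrsB g p := by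
    intro x; rw [hQ, List.mem_flatMap]
  have hcast : ((k + 1 : Nat) : Int) = (k : Int) + 1 := by push_cast; ring
  constructor
  · rw [hnew]; exact pvCollect_nodup_keys _ _ _ _ inv.nodup
  · rw [hget, inv.start0]
    simp
  · intro p d h; rw [hget] at h
    split_ifs at h with hp
    · rcases Option.some.inj h with rfl
      constructor <;> omega
    · obtain ⟨h1, h2⟩ := inv.bound p d h
      constructor <;> omega
  · intro p h; rw [hget] at h
    split_ifs at h with hp
    · exfalso; rcases Option.some.inj h with h'; omega
    · exact inv.zero p h
  · intro p
    rw [hout p, hget]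
    constructor
    · rintro ⟨hpQ, hpn⟩
      rw [if_pos ⟨hpQ, hpn⟩, hcast]
    · intro h
      split_ifs at h with hp
      · exact hp
      · exfalso
        rw [hcast] at h
        obtain ⟨_, hb⟩ := inv.bound p _ h
        omega
  · intro p d h hd
    rw [hget] at h
    split_ifs at h with hp
    · rcases Option.some.inj h with rfl
      obtain ⟨hpQ, hpn⟩ := hp
      obtain ⟨q, hqfr, hqN⟩ := (hQmem p).1 hpQ
      have hq : st.1.get? q = some (k : Int) := (inv.fr q).1 hqfr
      refine ⟨pvNbrsB_contains g q p hqN, ⟨q, ?_, hqN⟩⟩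
      rw [hget, if_neg (by simp [hq])]
      rw [hq]
      congr 1
      ring
    · obtain ⟨hGp, q, hq, hqN⟩ := inv.pred p d h hd
      refine ⟨hGp, ⟨q, ?_, hqN⟩⟩
      rw [hget, if_neg (by simp [hq])]
      exact hq
  · intro p d h hd q hqN
    rw [hget] at h
    split_ifs at h with hp
    · exfalso; rcases Option.some.inj h with rfl; omega
    · by_cases hdk : d < (k : Int)
      · obtain ⟨dq, hdq, hle⟩ := inv.expl p d h hdk q hqN
        exact ⟨dq, by rw [hget, if_neg (by simp [hdq])]; exact hdq, hle⟩
      · have hdk' : d = (k : Int) := by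
          rw [hcast] at hd
          omega
        subst hdk'
        have hpfr : p ∈ st.2 := (inv.fr p).2 h
        have hqQ : q ∈ Q := (hQmem q).2 ⟨p, hpfr, hqN⟩
        by_cases hqn : st.1.get? q = none
        · exact ⟨_, by rw [hget, if_pos ⟨hqQ, hqn⟩], by omega⟩
        · obtain ⟨dq, hdq⟩ := Option.ne_none_iff_exists'.1 hqn
          refine ⟨dq, by rw [hget, if_neg (by simp [hdq])]; exact hdq, ?_⟩
          obtain ⟨_, hb⟩ := inv.bound q dq hdq
          omega
  · intro p d h
    rw [hget] at h
    split_ifs at h with hp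
    · rcases Option.some.inj h with rfl
      obtain ⟨hpQ, hpn⟩ := hp
      obtain ⟨q, hqfr, hqN⟩ := (hQmem p).1 hpQ
      have hq : st.1.get? q = some (k : Int) := (inv.fr q).1 hqfr
      have hpar := inv.par q _ hq
      have hdiff := pvNbrsB_parity g q p hqN
      rcases hdiff with h' | h' <;> omega
    · exact inv.par p d h

lemma pvInv_all (g : PySem.Set (Int × Int)) (start : Int × Int) (k : Nat) :
    PvInv g start k (pvBState g start k) := by
  induction k with
  | zero => exact pvInv_zero g start
  | succ k ih => exact pvInv_step g start k ih

-- ===== the exact-step characterisation =====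
set_option maxHeartbeats 1600000 in
lemma pvSA_char (g : PySem.Set (Int × Int)) (start : Int × Int) :
    ∀ (k : Nat), 1 ≤ k → k ≤ 64 → ∀ (p : Int × Int),
      (p ∈ pvSA (pvNbrsB g) start k ↔ ∃ d : Int,
        (pvBState g start 64).1.get? p = some d ∧ d ≤ (k : Int) ∧ d % 2 = (k : Int) % 2 ∧
        (d < (k : Int) → PySem.Set.contains g p = true ∧ pvNbrsB g p ≠ [])) := by
  have inv := pvInv_all g start 64
  generalize hB : pvBState g start 64 = fin
  rw [hB] at inv
  intro k
  induction k with
  | zero => intro h; omega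
  | succ n ih =>
    intro _ hk p
    show p ∈ pvExpand (pvNbrsB g) (pvSA (pvNbrsB g) start n) ↔ _
    rw [mem_pvExpand]
    rcases Nat.eq_zero_or_pos n with rfl | hn
    · -- base case k = 1
      constructor
      · rintro ⟨q, hq, hpN⟩
        rw [mem_pvSA_zero] at hq
        rw [hq] at hpN
        obtain ⟨d, hd, hle⟩ := inv.expl start 0 inv.start0 (by norm_num) p hpN
        have hpar1 := inv.par start 0 inv.start0
        have hpar2 := inv.par p d hd
        have hdiff := pvNbrsB_parity g start p hpN
        have hd1 : d = 1 := by
          obtain ⟨hd0, _⟩ := inv.bound p d hd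
          rcases hdiff with h' | h' <;> omega
        subst hd1
        refine ⟨1, hd, by norm_num, by norm_num, ?_⟩
        intro hlt
        exfalso
        norm_num at hlt
      · rintro ⟨d, hd, hle, hpar, _⟩
        have hd1 : d = 1 := by
          obtain ⟨hd0, _⟩ := inv.bound p d hd
          simp at hle hpar
          omega
        subst hd1
        obtain ⟨hGp, q, hq, hpN⟩ := inv.pred p 1 hd (by norm_num)
        have hq0 : fin.1.get? q = some 0 := by simpa using hq
        have hqs : q = start := inv.zero q hq0
        rw [hqs] at hpN
        exact ⟨start, (mem_pvSA_zero _ _ _).2 rfl, hpN⟩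
    · -- inductive step: n ≥ 1
      have ihn := ih hn (by omega)
      have hn63 : (n : Int) ≤ 63 := by exact_mod_cast Nat.le_of_lt_succ (by omega)
      constructor
      · rintro ⟨q, hq, hpN⟩
        obtain ⟨d', hd', hle', hpar', hcond'⟩ := (ihn q).1 hq
        obtain ⟨d, hd, hle⟩ := inv.expl q d' hd' (by omega) p hpN
        have hparq := inv.par q d' hd'
        have hparp := inv.par p d hd
        have hdiff := pvNbrsB_parity g q p hpN
        refine ⟨d, hd, by push_cast; omega,
          by push_cast at hpar' ⊢; rcases hdiff with h' | h' <;> omega, ?_⟩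
        intro hdlt
        have hGp : PySem.Set.contains g p = true := pvNbrsB_contains g q p hpN
        refine ⟨hGp, ?_⟩
        have hGq : PySem.Set.contains g q = true := by
          by_cases hd'0 : 1 ≤ d'
          · exact (inv.pred q d' hd' hd'0).1
          · have hz : d' = 0 := by obtain ⟨h0, _⟩ := inv.bound q d' hd'; omega
            rw [hz] at hd'
            have hqs : q = start := inv.zero q hd'
            have hnpos : (0 : Int) < (n : Int) := by exact_mod_cast hn
            exact (hcond' (by omega)).1
        have hqNp : q ∈ pvNbrsB g p := pvNbrsB_symm g q p hpN hGq
        exact List.ne_nil_of_mem hqNp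
      · rintro ⟨d, hd, hle, hpar, hcond⟩
        push_cast at hle hpar
        by_cases hdn : d = (n : Int) + 1
        · subst hdn
          obtain ⟨hGp, q, hq, hpN⟩ := inv.pred p ((n : Int) + 1) hd (by omega)
          have hq' : fin.1.get? q = some (n : Int) := by
            rw [hq]; norm_num
          refine ⟨q, (ihn q).2 ⟨(n : Int), hq', le_refl _, rfl,
            fun hlt => absurd hlt (lt_irrefl _)⟩, hpN⟩
        · -- d ≤ n - 1: waste two steps through any neighbour of p
          have hdle : d ≤ (n : Int) - 1 := by
            obtain ⟨h0, _⟩ := inv.bound p d hd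
            omega
          obtain ⟨hGp, hne⟩ := hcond (by omega)
          obtain ⟨q, hqN⟩ := List.exists_mem_of_ne_nil _ hne
          have hGq := pvNbrsB_contains g p q hqN
          obtain ⟨dq, hdq, hdqle⟩ := inv.expl p d hd (by omega) q hqN
          have hparp := inv.par p d hd
          have hparq := inv.par q dq hdq
          have hdiff := pvNbrsB_parity g p q hqN
          have hqd : dq ≤ (n : Int) ∧ dq % 2 = (n : Int) % 2 := by
            obtain ⟨h0, _⟩ := inv.bound q dq hdq
            constructor <;> (rcases hdiff with h' | h' <;> omega)
          have hpNq : p ∈ pvNbrsB g q := pvNbrsB_symm g p q hqN hGp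
          refine ⟨q, (ihn q).2 ⟨dq, hdq, hqd.1, hqd.2, ?_⟩, hpNq⟩
          intro _
          exact ⟨hGq, List.ne_nil_of_mem hpNq⟩

-- ===== counting =====
lemma pvDict_values_countP (D : PySem.Dict (Int × Int) Int) (pb : Int → Bool) :
    D.values.countP pb = ((D.items.filter (fun pr => pb pr.2)).map Prod.fst).length := by
  show (D.items.map Prod.snd).countP pb = _
  rw [List.countP_map, List.countP_eq_length_filter, List.length_map]
  congr 1

lemma mem_pvK (D : PySem.Dict (Int × Int) Int) (hnd : D.keys.Nodup) (pb : Int → Bool)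
    (p : Int × Int) :
    (p ∈ (D.items.filter (fun pr => pb pr.2)).map Prod.fst) ↔
      ∃ d, D.get? p = some d ∧ pb d = true := by
  simp only [List.mem_map, List.mem_filter]
  constructor
  · rintro ⟨⟨p', d⟩, ⟨hmem, hpb⟩, rfl⟩
    exact ⟨d, (PySem.Dict.get?_eq_some_iff_mem_items D _ d hnd).2 hmem, hpb⟩
  · rintro ⟨d, hget, hpb⟩
    exact ⟨(p, d), ⟨(PySem.Dict.get?_eq_some_iff_mem_items D p d hnd).1 hget, hpb⟩, rfl⟩

lemma nodup_pvK (D : PySem.Dict (Int × Int) Int) (hnd : D.keys.Nodup) (pb : Int → Bool) :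
    ((D.items.filter (fun pr => pb pr.2)).map Prod.fst).Nodup := by
  have h1 : List.Sublist ((D.items.filter (fun pr => pb pr.2)).map Prod.fst)
      (D.items.map Prod.fst) := List.Sublist.map Prod.fst List.filter_sublist
  exact (show (D.items.map Prod.fst).Nodup from hnd).sublist h1

lemma pvCount_eq (g : PySem.Set (Int × Int)) (start : Int × Int) :
    (pvSA (pvNbrsB g) start 64).length
      = (pvBState g start 64).1.values.countP
          (fun d => decide (PySem.Int.mod d 2 = 0 ∧ 0 < d))
        + (if PySem.Set.contains g start = true ∧ pvNbrsB g start ≠ [] then 1 else 0) := by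
  have inv := pvInv_all g start 64
  have char := pvSA_char g start 64 (by norm_num) (by norm_num)
  obtain ⟨fin, hB⟩ : ∃ fin, pvBState g start 64 = fin := ⟨_, rfl⟩
  rw [hB] at inv char ⊢
  set D := fin.1 with hD
  set K := (D.items.filter
      (fun pr => decide (PySem.Int.mod pr.2 2 = 0 ∧ 0 < pr.2))).map Prod.fst with hK
  have hpb' : ∀ d : Int, decide (PySem.Int.mod d 2 = 0 ∧ 0 < d) = true ↔ (d % 2 = 0 ∧ 0 < d) := by
    intro d
    rw [PySem.Int.mod_eq_emod_of_pos (show (0:Int) < 2 by norm_num)]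
    simp
  have hmemK : ∀ p, p ∈ K ↔ ∃ d, D.get? p = some d ∧
      decide (PySem.Int.mod d 2 = 0 ∧ 0 < d) = true := by
    intro p
    rw [hK]
    exact mem_pvK D inv.nodup (fun d => decide (PySem.Int.mod d 2 = 0 ∧ 0 < d)) p
  have hndK : K.Nodup := by rw [hK]; exact nodup_pvK D inv.nodup (fun d => decide (PySem.Int.mod d 2 = 0 ∧ 0 < d))
  have hstartK : start ∉ K := by
    rw [hmemK]
    rintro ⟨d, hget, hpb1⟩
    have h0 : D.get? start = some 0 := inv.start0
    rw [h0] at hget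
    rcases Option.some.inj hget with rfl
    rw [hpb'] at hpb1
    omega
  set M := K ++ (if PySem.Set.contains g start = true ∧ pvNbrsB g start ≠ []
      then [start] else []) with hM
  have hmemM : ∀ p, p ∈ pvSA (pvNbrsB g) start 64 ↔ p ∈ M := by
    intro p
    rw [char p, hM, List.mem_append, hmemK]
    constructor
    · rintro ⟨d, hget, hle, hpar, hcond⟩
      obtain ⟨hb0, hb64⟩ := inv.bound p d hget
      by_cases hd0 : d = 0
      · subst hd0
        have hps : p = start := inv.zero p hget
        right
        have hg0 := hcond (by norm_num)
        rw [hps] at hg0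
        rw [if_pos hg0]
        simp [hps]
      · left
        refine ⟨d, hget, (hpb' d).2 ⟨?_, by omega⟩⟩
        push_cast at hpar
        omega
    · rintro (⟨d, hget, hpbd⟩ | hs)
      · rw [hpb'] at hpbd
        obtain ⟨hb0, hb64⟩ := inv.bound p d hget
        refine ⟨d, hget, by push_cast; omega, by push_cast; omega, ?_⟩
        intro hlt
        obtain ⟨hGp, q, hq, hpN⟩ := inv.pred p d hget (by omega)
        have hGq : PySem.Set.contains g q = true := (inv.pred q (d - 1) hq (by omega)).1
        exact ⟨hGp, List.ne_nil_of_mem (pvNbrsB_symm g q p hpN hGq)⟩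
      · split_ifs at hs with hg
        · rcases List.mem_singleton.1 hs with rfl
          exact ⟨0, inv.start0, by norm_num, by norm_num, fun _ => hg⟩
        · simp at hs
  have hndM : M.Nodup := by
    rw [hM]
    refine List.Nodup.append hndK ?_ ?_
    · split_ifs <;> simp
    · intro a haK haR
      split_ifs at haR with hg
      · rcases List.mem_singleton.1 haR with rfl
        exact hstartK haK
      · simp at haR
  have hperm : (pvSA (pvNbrsB g) start 64).Perm M :=
    (List.perm_ext_iff_of_nodup (nodup_pvSA _ _ _) hndM).2 (fun a => hmemM a)
  rw [hperm.length_eq, hM, List.length_append, pvDict_values_countP]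
  rw [← hK]
  split_ifs <;> simp

lemma part1_alt_eq (lines : List String) :
    part1_alt lines
      = ((pvBState (pvScanB lines).2 (pvScanB lines).1 64).1.values.countP
            (fun d => decide (PySem.Int.mod d 2 = 0 ∧ 0 < d)) : Int)
        + (if PySem.Set.contains (pvScanB lines).2 (pvScanB lines).1 = true
              ∧ pvNbrsB (pvScanB lines).2 (pvScanB lines).1 ≠ [] then 1 else 0) := by
  simp only [part1_alt]
  rw [show (65 : Int) = 1 + ((64 : Nat) : Int) by norm_num]
  rw [pvBState_eq_foldl]
  rw [PySem.List.foldl_ite_add_one (fun d => PySem.Int.mod d 2 = 0 ∧ 0 < d) _ 0]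
  split_ifs with hg <;> push_cast <;> ring

-- ===== VERDICT (by name: the statement is the Claim_ definition above) =====
theorem part1_spec : Claim_equal_part1 := by
  unfold Claim_equal_part1
  intro lines _
  unfold Spec_part1
  rw [part1_eq, part1_alt_eq, pvCount_eq]
  split_ifs <;> push_cast <;> ring
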